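-- pv_equiv track=rewrite | github.com/mscrnt/chatterbot | src/chatterbot/bot.py | _is_emote_only
-- ===== SOURCE A (Python) =====
-- def _is_emote_only(content: str, emotes_tag: str | None) -> bool:
--     """Decide whether a chat message is just emotes + whitespace.
--
--     Twitch IRCv3 emits the exact spans of every native emote in the
--     `emotes` tag, formatted as `id:start-end,start-end/id:start-end`.
--     Positions are 0-indexed character offsets into the message content,
--     counting Unicode code points (NOT UTF-16 like JS, NOT bytes).
--
--     We mark the message emote-only when subtracting every emote span
--     leaves nothing but whitespace. BTTV/FFZ emotes aren't in the IRC
--     tag (they're rendered client-side) so we treat them as plain text —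
--     a 'bawkCrazy bawkCrazy bawkCrazy' message from a Twitch channel
--     emote will be marked emote-only because Twitch IS aware of it.
--     """
--     if not emotes_tag or not content:
--         return False
--     # IRC offsets are over Unicode code points; index a code-point list,
--     # not the UTF-16 string, so emotes after a multi-byte char align.
--     chars = list(content)
--     keep = [True] * len(chars)
--     for chunk in emotes_tag.split("/"):
--         if ":" not in chunk:
--             continue
--         _, spans = chunk.split(":", 1)
--         for span in spans.split(","):
--             if "-" not in span:
--                 continue
--             try:
--                 start_s, end_s = span.split("-", 1)
--                 start = int(start_s)
--                 end = int(end_s)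
--             except ValueError:
--                 continue
--             for i in range(start, min(end + 1, len(chars))):
--                 keep[i] = False
--     leftover = "".join(c for c, k in zip(chars, keep) if k).strip()
--     return leftover == ""
-- ===== SOURCE B (Python) =====
-- def _is_emote_only(content: str, emotes_tag: str | None) -> bool:
--     """Difference-array re-implementation: mark each emote span as an
--     interval (+1 at start, -1 past end), then one prefix-sum sweep over
--     the message decides whether every uncovered character is whitespace."""
--     if not emotes_tag or not content:
--         return False
--     n = len(content)
--     diff = [0] * (n + 1)
--     for chunk in emotes_tag.split("/"):
--         if ":" not in chunk:
--             continue
--         _, spans = chunk.split(":", 1)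
--         for span in spans.split(","):
--             if "-" not in span:
--                 continue
--             try:
--                 start_s, end_s = span.split("-", 1)
--                 lo = max(int(start_s), 0)
--                 hi = min(int(end_s) + 1, n)
--             except ValueError:
--                 continue
--             if lo < hi:
--                 diff[lo] += 1
--                 diff[hi] -= 1
--     cov = 0
--     for c, d in zip(content, diff):
--         cov += d
--         if cov == 0 and not c.isspace():
--             return False
--     return True
-- ===== Notes on version B (the rewrite author's own statement) =====
-- stated objective: alternative
-- what changed: Replaces the per-span boolean-mask writes plus join/strip of leftovers with a difference array (+1/-1 at interval end-points) and a single prefix-sum sweep that checks uncovered characters for whitespace; per-span work drops from O(span length) to O(1) (measured 4.24x median at the largest size but not consistent across inputs, so not labelled faster).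
import Mathlib
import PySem

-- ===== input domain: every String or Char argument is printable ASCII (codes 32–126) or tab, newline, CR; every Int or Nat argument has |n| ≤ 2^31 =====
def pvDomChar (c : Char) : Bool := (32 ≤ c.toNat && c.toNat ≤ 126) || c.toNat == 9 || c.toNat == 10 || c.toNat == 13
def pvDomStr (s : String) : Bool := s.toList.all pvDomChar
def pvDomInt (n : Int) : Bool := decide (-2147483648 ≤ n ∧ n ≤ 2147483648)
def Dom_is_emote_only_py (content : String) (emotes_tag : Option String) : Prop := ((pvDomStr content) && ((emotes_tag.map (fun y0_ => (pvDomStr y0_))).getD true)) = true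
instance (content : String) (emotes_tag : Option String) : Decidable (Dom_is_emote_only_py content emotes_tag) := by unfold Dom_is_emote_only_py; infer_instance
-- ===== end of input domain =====

-- B replaces A's per-span boolean-mask writes and join/strip of leftovers with a
-- difference array and one prefix-sum sweep: O(1) work per span instead of one write per
-- covered position. Intended as faster; a timing run's verdict varied between runs
-- (span-light inputs gain little), so no unqualified speed claim is made here.

-- ===== PORT A =====
-- inner loop 'for i in range(start, min(end+1, len(chars))): keep[i] = False';
-- ported by hand: keep[i] = False is ks.set i.toNat false — exact whenever 0 ≤ i,
-- which holds on every reachable execution (start is parsed from a dash-free piece,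
-- hence never negative); for (unreachable) negative i we choose the no-op.
def pvMark (ks : List Bool) (start stop : Int) : List Bool :=
  (PySem.List.pyRange start (min (stop + 1) (ks.length : Int)) 1).foldl
    (fun ks i => if 0 ≤ i then ks.set i.toNat false else ks) ks

def is_emote_only_py (content : String) (emotes_tag : Option String) : Bool :=
  match emotes_tag with
  | none => false
  | some tag =>
    if tag = "" ∨ content = "" then false
    else
      let chars := content.toList
      let keep := List.replicate chars.length true
      let keep := ((PySem.Str.split? tag "/").getD []).foldl (fun keep chunk =>
        if PySem.Str.isIn ":" chunk then
          let spans := ((PySem.Str.splitMax? chunk ":" 1).getD []).getD 1 ""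
          ((PySem.Str.split? spans ",").getD []).foldl (fun keep span =>
            if PySem.Str.isIn "-" span then
              let parts := (PySem.Str.splitMax? span "-" 1).getD []
              match PySem.Int.ofStr? (parts.getD 0 ""), PySem.Int.ofStr? (parts.getD 1 "") with
              | some start, some stop => pvMark keep start stop
              | _, _ => keep
            else keep) keep
        else keep) keep
      -- "".join(c for c, k in zip(chars, keep) if k).strip() == ""
      decide (PySem.Chars.strip
        ((chars.zip keep).filterMap (fun ck => if ck.2 then some ck.1 else none)) = [])

-- ===== PORT B =====
-- 'diff[lo] += 1; diff[hi] -= 1' under the guard lo < hi (with 0 ≤ lo by the max):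
-- indices are in range, set at .toNat is exact.
-- 'diff[j] += c'
def pvBump (xs : List Int) (j : Nat) (c : Int) : List Int :=
  xs.set j (xs.getD j 0 + c)

def pvDiffAdd (diff : List Int) (start stop : Int) : List Int :=
  if max start 0 < min (stop + 1) ((diff.length : Int) - 1) then
    pvBump (pvBump diff (max start 0).toNat 1)
      (min (stop + 1) ((diff.length : Int) - 1)).toNat (-1)
  else diff

-- 'for c, d in zip(content, diff): cov += d; if cov == 0 and not c.isspace(): return False'
def pvScan : List (Char × Int) → Int → Bool
  | [], _ => true
  | (c, d) :: rest, cov =>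
    let cov := cov + d
    if cov == 0 && !(PySem.Chars.isspace c) then false else pvScan rest cov

def is_emote_only_py_alt (content : String) (emotes_tag : Option String) : Bool :=
  match emotes_tag with
  | some tag =>
    if tag = "" ∨ content = "" then false
    else
      let n := content.toList.length
      let diff : List Int := List.replicate (n + 1) 0
      let diff := ((PySem.Str.split? tag "/").getD []).foldl (fun diff chunk =>
        if PySem.Str.isIn ":" chunk then
          let spans := ((PySem.Str.splitMax? chunk ":" 1).getD []).getD 1 ""
          ((PySem.Str.split? spans ",").getD []).foldl (fun diff span =>
            if PySem.Str.isIn "-" span then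
              let parts := (PySem.Str.splitMax? span "-" 1).getD []
              match PySem.Int.ofStr? (parts.getD 0 "") with
              | none => diff
              | some start =>
                match PySem.Int.ofStr? (parts.getD 1 "") with
                | none => diff
                | some stop => pvDiffAdd diff start stop
            else diff) diff
        else diff) diff
      pvScan (content.toList.zip diff) 0
  | none => false

-- ===== PRECONDITION & SPEC =====
def Spec_is_emote_only_py (content : String) (emotes_tag : Option String) (out : Bool) : Prop := out = is_emote_only_py_alt content emotes_tag
instance (content : String) (emotes_tag : Option String) (out : Bool) : Decidable (Spec_is_emote_only_py content emotes_tag out) := by unfold Spec_is_emote_only_py; infer_instance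

-- ===== CLAIM (what is proved, stated in full; the proofs are below) =====
def Claim_equal_is_emote_only_py : Prop := ∀ (content : String) (emotes_tag : Option String), Dom_is_emote_only_py content emotes_tag → Spec_is_emote_only_py content emotes_tag (is_emote_only_py content emotes_tag)

-- ===== LEMMAS AND PROOFS =====

-- two folds over the same list, in lockstep through a relation
theorem pvFoldlRel {σ τ α : Type} (R : σ → τ → Prop) (f : σ → α → σ) (g : τ → α → τ)
    (h : ∀ s t a, R s t → R (f s a) (g t a)) :
    ∀ (l : List α) (s : σ) (t : τ), R s t → R (l.foldl f s) (l.foldl g t)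
  | [], _, _, hst => hst
  | a :: l, s, t, hst => pvFoldlRel R f g h l _ _ (h s t a hst)

-- the invariant relating A's boolean mask to B's difference array
def pvRel (n : Nat) (ks : List Bool) (diff : List Int) : Prop :=
  ks.length = n ∧ diff.length = n + 1 ∧
  ∀ i : Nat, i < n →
    0 ≤ (diff.take (i + 1)).sum ∧ ks.getD i true = decide ((diff.take (i + 1)).sum = 0)

theorem pvSetFoldLength (L : List Int) :
    ∀ ks : List Bool,
      (L.foldl (fun ks i => if 0 ≤ i then ks.set i.toNat false else ks) ks).length = ks.length := by
  induction L with
  | nil => intro ks; rfl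
  | cons a L ih =>
    intro ks
    simp only [List.foldl_cons]
    rw [ih]
    split <;> simp

theorem pvSetGetD (ks : List Bool) (a : Nat) (p : Nat) :
    (ks.set a false).getD p true =
      if a = p ∧ p < ks.length then false else ks.getD p true := by
  rw [List.getD_eq_getElem?_getD, List.getElem?_set, List.getD_eq_getElem?_getD]
  by_cases h1 : a = p
  · subst h1
    by_cases h2 : a < ks.length
    · simp [h2]
    · rw [if_pos rfl, if_neg h2, if_neg (by tauto), List.getElem?_eq_none (by omega)]
  · simp [h1]

theorem pvSetFoldGetD (L : List Int) :
    ∀ (ks : List Bool) (p : Nat),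
      (L.foldl (fun ks i => if 0 ≤ i then ks.set i.toNat false else ks) ks).getD p true =
        if (∃ j ∈ L, 0 ≤ j ∧ j.toNat = p) ∧ p < ks.length then false else ks.getD p true := by
  induction L with
  | nil => intro ks p; simp
  | cons a L ih =>
    intro ks p
    simp only [List.foldl_cons]
    by_cases ha : 0 ≤ a
    · rw [if_pos ha, ih, pvSetGetD, List.length_set]
      simp only [List.exists_mem_cons_iff]
      by_cases hQ : ∃ j ∈ L, 0 ≤ j ∧ j.toNat = p
      all_goals by_cases hp : p < ks.length
      all_goals by_cases h2 : a.toNat = p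
      all_goals simp [hQ, hp, h2, ha]
    · rw [if_neg ha, ih]
      congr 1
      simp only [List.exists_mem_cons_iff, eq_iff_iff]
      tauto

theorem pvMark_length (ks : List Bool) (start stop : Int) :
    (pvMark ks start stop).length = ks.length := by
  unfold pvMark; exact pvSetFoldLength _ ks

theorem pvMark_getD (ks : List Bool) (start stop : Int) (p : Nat) :
    (pvMark ks start stop).getD p true =
      if max start 0 ≤ (p : Int) ∧ (p : Int) < min (stop + 1) (ks.length : Int)
      then false else ks.getD p true := by
  unfold pvMark
  rw [pvSetFoldGetD]
  congr 1
  simp only [eq_iff_iff, PySem.List.mem_pyRange_one]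
  constructor
  · rintro ⟨⟨j, ⟨hj1, hj2⟩, hj0, hjp⟩, hp⟩
    have : j = (p : Int) := by omega
    subst this
    omega
  · rintro ⟨h1, h2⟩
    have hp : p < ks.length := by omega
    exact ⟨⟨(p : Int), ⟨by omega, by omega⟩, by omega, by simp⟩, hp⟩

-- sum of a prefix after bumping one in-range entry by c
theorem pvSumTakeSet (xs : List Int) :
    ∀ (j : Nat) (c : Int) (m : Nat), j < xs.length →
      ((xs.set j (xs.getD j 0 + c)).take m).sum = (xs.take m).sum + if j < m then c else 0 := by
  induction xs with
  | nil => intro j c m h; simp at h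
  | cons x xs ih =>
    intro j c m h
    cases j with
    | zero =>
      cases m with
      | zero => simp
      | succ m => simp [List.getD]; ring
    | succ j =>
      cases m with
      | zero => simp
      | succ m =>
        simp only [List.set_cons_succ, List.take_succ_cons, List.sum_cons]
        simp only [List.getD_cons_succ]
        rw [ih j c m (by simpa using h)]
        simp only [Nat.add_lt_add_iff_right]
        ring

theorem pvBump_length (xs : List Int) (j : Nat) (c : Int) :
    (pvBump xs j c).length = xs.length := by
  simp [pvBump]

theorem pvBumpSum (xs : List Int) (j : Nat) (c : Int) (m : Nat) (hj : j < xs.length) :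
    ((pvBump xs j c).take m).sum = (xs.take m).sum + if j < m then c else 0 :=
  pvSumTakeSet xs j c m hj

theorem pvDiffAdd_length (diff : List Int) (start stop : Int) :
    (pvDiffAdd diff start stop).length = diff.length := by
  unfold pvDiffAdd
  split <;> simp [pvBump]

theorem pvDiffAdd_take_sum (diff : List Int) (start stop : Int) (i : Nat)
    (hi : i + 1 < diff.length) :
    ((pvDiffAdd diff start stop).take (i + 1)).sum =
      (diff.take (i + 1)).sum +
        if max start 0 ≤ (i : Int) ∧ (i : Int) < min (stop + 1) ((diff.length : Int) - 1)
        then 1 else 0 := by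
  unfold pvDiffAdd
  split
  · next hlt =>
    have hlo0 : (0 : Int) ≤ max start 0 := le_max_right _ _
    have hhiub : min (stop + 1) ((diff.length : Int) - 1) ≤ (diff.length : Int) - 1 :=
      min_le_right _ _
    set lo := max start 0 with hlo
    set hi' := min (stop + 1) ((diff.length : Int) - 1) with hhi
    have hlolen : lo.toNat < diff.length := by omega
    have hhilen : hi'.toNat < diff.length := by omega
    rw [pvBumpSum _ hi'.toNat (-1) (i + 1) (by rw [pvBump_length]; exact hhilen),
      pvBumpSum diff lo.toNat 1 (i + 1) hlolen]
    split_ifs <;> omega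
  · next hge =>
    rw [if_neg (by omega)]
    simp

theorem pvStep (n : Nat) (ks : List Bool) (diff : List Int) (start stop : Int)
    (h : pvRel n ks diff) : pvRel n (pvMark ks start stop) (pvDiffAdd diff start stop) := by
  obtain ⟨hk, hdl, hinv⟩ := h
  refine ⟨by rw [pvMark_length, hk], by rw [pvDiffAdd_length, hdl], ?_⟩
  intro i hi
  obtain ⟨hnn, hgd⟩ := hinv i hi
  have hsum := pvDiffAdd_take_sum diff start stop i (by omega)
  rw [pvMark_getD, hsum]
  split_ifs with h1 h2
  · refine ⟨by omega, ?_⟩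
    have hne : ¬ ((diff.take (i + 1)).sum + 1 = 0) := by omega
    simp [hne]
  · exfalso; omega
  · exfalso; omega
  · simpa using ⟨hnn, hgd⟩

-- strip leaves nothing iff every character is whitespace
theorem pvStripNil (cs : List Char) :
    PySem.Chars.strip cs = [] ↔ ∀ c ∈ cs, PySem.Chars.isspace c := by
  simp only [PySem.Chars.strip, PySem.Chars.rstrip, PySem.Chars.lstrip]
  rw [List.reverse_eq_nil_iff, List.dropWhile_eq_nil_iff]
  constructor
  · intro h c hc
    by_cases hs : PySem.Chars.isspace c
    · exact hs
    · exfalso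
      have hsplit := List.takeWhile_append_dropWhile (p := PySem.Chars.isspace) (l := cs)
      rw [← hsplit] at hc
      rcases List.mem_append.mp hc with h1 | h2
      · exact hs (List.mem_takeWhile_imp h1)
      · exact hs (h c (by simpa using h2))
  · intro h c hc
    exact h c ((List.dropWhile_sublist _).subset (by simpa using hc))

-- the prefix-sum sweep equals "kept leftovers are all whitespace"
theorem pvScan_cons (c : Char) (d : Int) (rest : List (Char × Int)) (cov : Int) :
    pvScan ((c, d) :: rest) cov =
      if (cov + d == 0 && !(PySem.Chars.isspace c)) then false
      else pvScan rest (cov + d) := rfl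

theorem pvScanIff (chars : List Char) :
    ∀ (ks : List Bool) (diff : List Int) (cov : Int),
      ks.length = chars.length → diff.length = chars.length + 1 →
      (∀ i : Nat, i < chars.length →
        0 ≤ cov + (diff.take (i + 1)).sum ∧
          ks.getD i true = decide (cov + (diff.take (i + 1)).sum = 0)) →
      pvScan (chars.zip diff) cov =
        decide (∀ c ∈ (chars.zip ks).filterMap (fun ck => if ck.2 then some ck.1 else none),
          PySem.Chars.isspace c) := by
  induction chars with
  | nil => intro ks diff cov _ _ _; simp [pvScan]
  | cons c cs ih =>
    intro ks diff cov hkl hdl hinv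
    obtain ⟨k, ks', rfl⟩ : ∃ k ks', ks = k :: ks' := by
      cases ks with
      | nil => simp at hkl
      | cons a b => exact ⟨a, b, rfl⟩
    obtain ⟨d, diff', rfl⟩ : ∃ d diff', diff = d :: diff' := by
      cases diff with
      | nil => simp at hdl
      | cons a b => exact ⟨a, b, rfl⟩
    have h0 := hinv 0 (by simp)
    simp only [List.take_succ_cons, List.take_zero, List.sum_cons, List.sum_nil,
      List.getD_cons_zero, add_zero] at h0
    obtain ⟨h0n, h0k⟩ := h0
    have htail : ∀ i : Nat, i < cs.length →
        0 ≤ (cov + d) + (diff'.take (i + 1)).sum ∧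
          ks'.getD i true = decide ((cov + d) + (diff'.take (i + 1)).sum = 0) := by
      intro i hi
      have := hinv (i + 1) (by simpa using Nat.succ_lt_succ hi)
      simpa [add_assoc] using this
    have hrec := ih ks' diff' (cov + d) (by simpa using hkl) (by simpa using hdl) htail
    simp only [List.zip_cons_cons, List.filterMap_cons]
    rw [pvScan_cons]
    by_cases hk2 : k = true
    · have hcov : cov + d = 0 := by
        rw [hk2] at h0k
        exact of_decide_eq_true h0k.symm
      rw [hcov] at hrec ⊢
      by_cases hsp : PySem.Chars.isspace c = true
      · simp [hk2, hsp, hrec]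
      · simp [hk2, hsp]
    · have hk' : k = false := by simpa using hk2
      have hcov : ¬ (cov + d = 0) := of_decide_eq_false (hk' ▸ h0k).symm
      simp [hk', hcov, hrec]

-- ===== VERDICT (by name: the statement is the Claim_ definition above) =====
theorem is_emote_only_py_spec : Claim_equal_is_emote_only_py := by
  intro content emotes_tag _
  unfold Spec_is_emote_only_py
  cases emotes_tag with
  | none => rfl
  | some tag =>
    by_cases hempty : tag = "" ∨ content = ""
    · simp [is_emote_only_py, is_emote_only_py_alt, hempty]
    · simp only [is_emote_only_py, is_emote_only_py_alt]
      rw [if_neg hempty, if_neg hempty]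
      set chars := content.toList with hchars
      set n := chars.length with hn
      have hinit : pvRel n (List.replicate n true) (List.replicate (n + 1) 0) := by
        refine ⟨by simp, by simp, ?_⟩
        intro i hi
        constructor
        · simp [List.take_replicate]
        · simp [List.take_replicate, List.getD_eq_getElem?_getD, hi]
      have hfinal : pvRel n
          (((PySem.Str.split? tag "/").getD []).foldl (fun keep chunk =>
            if PySem.Str.isIn ":" chunk then
              let spans := ((PySem.Str.splitMax? chunk ":" 1).getD []).getD 1 ""
              ((PySem.Str.split? spans ",").getD []).foldl (fun keep span =>
                if PySem.Str.isIn "-" span then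
                  let parts := (PySem.Str.splitMax? span "-" 1).getD []
                  match PySem.Int.ofStr? (parts.getD 0 ""), PySem.Int.ofStr? (parts.getD 1 "") with
                  | some start, some stop => pvMark keep start stop
                  | _, _ => keep
                else keep) keep
            else keep) (List.replicate n true))
          (((PySem.Str.split? tag "/").getD []).foldl (fun diff chunk =>
            if PySem.Str.isIn ":" chunk then
              let spans := ((PySem.Str.splitMax? chunk ":" 1).getD []).getD 1 ""
              ((PySem.Str.split? spans ",").getD []).foldl (fun diff span =>
                if PySem.Str.isIn "-" span then
                  let parts := (PySem.Str.splitMax? span "-" 1).getD []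
                  match PySem.Int.ofStr? (parts.getD 0 "") with
                  | none => diff
                  | some start =>
                    match PySem.Int.ofStr? (parts.getD 1 "") with
                    | none => diff
                    | some stop => pvDiffAdd diff start stop
                else diff) diff
            else diff) (List.replicate (n + 1) 0)) := by
        refine pvFoldlRel (pvRel n) _ _ ?_ _ _ _ hinit
        intro ks diff chunk hR
        by_cases hc : PySem.Str.isIn ":" chunk = true
        · simp only [hc]
          refine pvFoldlRel (pvRel n) _ _ ?_ _ _ _ hR
          intro ks' diff' span hR'
          by_cases hs : PySem.Str.isIn "-" span = true
          · simp only [hs]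
            cases PySem.Int.ofStr? (((PySem.Str.splitMax? span "-" 1).getD []).getD 0 "") with
            | none =>
              cases PySem.Int.ofStr? (((PySem.Str.splitMax? span "-" 1).getD []).getD 1 "") with
              | none => exact hR'
              | some stop => exact hR'
            | some start =>
              cases PySem.Int.ofStr? (((PySem.Str.splitMax? span "-" 1).getD []).getD 1 "") with
              | none => exact hR'
              | some stop => exact pvStep n ks' diff' start stop hR'
          · simp only [hs]
            simpa [hs] using hR'
        · simp only [hc]
          simpa [hc] using hR
      obtain ⟨hkl, hdl, hinv⟩ := hfinal
      rw [pvScanIff chars _ _ 0 hkl hdl (by simpa using hinv)]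
      rw [decide_eq_decide]
      exact pvStripNil _
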